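-- pv_equiv track=rewrite | github.com/snegirevdv/hexlet-challenges | declarative/length_frequencies.py | length_frequencies
-- ===== SOURCE A (Python) =====
-- from collections.abc import Iterable
-- import itertools
--
-- def length_frequencies(iterable: Iterable[str]) -> dict[int, int]:
--     return {
--         length: len(list(count))
--         for length, count
--         in itertools.groupby(
--             sorted(iterable, key=len),
--             key=len
--         )
--     }
-- ===== SOURCE B (Python) =====
-- def length_frequencies(iterable):
--     counts = {}
--     for s in iterable:
--         n = len(s)
--         counts[n] = counts.get(n, 0) + 1
--     return {n: counts[n] for n in sorted(counts)}
-- ===== Notes on version B (the rewrite author's own statement) =====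
-- stated objective: alternative
-- what changed: A sorts the whole input by length and counts consecutive itertools.groupby runs; B instead makes a single counting pass into a dict and then sorts only the distinct lengths, so no full sort of the n strings and no groupby.
import Mathlib
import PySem

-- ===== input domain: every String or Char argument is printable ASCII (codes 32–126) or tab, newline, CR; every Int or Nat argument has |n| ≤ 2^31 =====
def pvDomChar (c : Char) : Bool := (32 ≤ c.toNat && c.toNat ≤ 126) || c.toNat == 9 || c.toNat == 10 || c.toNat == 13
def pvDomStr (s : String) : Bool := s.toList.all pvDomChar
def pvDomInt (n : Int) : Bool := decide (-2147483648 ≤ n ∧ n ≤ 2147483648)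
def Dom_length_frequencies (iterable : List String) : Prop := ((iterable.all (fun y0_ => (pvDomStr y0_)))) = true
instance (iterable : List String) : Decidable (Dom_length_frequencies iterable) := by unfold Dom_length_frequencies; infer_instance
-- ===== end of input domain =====

-- B replaces A's sort-the-whole-list + itertools.groupby strategy by a single counting pass
-- into a dict followed by sorting only the distinct lengths (objective: alternative).


-- ===== PORT A =====
-- itertools.groupby(…, key=len) on the already sorted list: consecutive runs of equal length,
-- each yielding (length, size of the run).
def pvGroupRuns : List String → List (Int × Int)
  | [] => []
  | s :: rest =>
    (PySem.Str.len s, (1 : Int) + (rest.takeWhile (fun t => PySem.Str.len t == PySem.Str.len s)).length) ::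
      pvGroupRuns (rest.dropWhile (fun t => PySem.Str.len t == PySem.Str.len s))
  termination_by ss => ss.length
  decreasing_by
    simp only [List.length_cons]
    exact Nat.lt_succ_of_le (List.length_dropWhile_le _ _)

def length_frequencies (iterable : List String) : List (Int × Int) :=
  ((pvGroupRuns (PySem.List.sorted iterable (fun s => PySem.Str.len s) false)).foldl
    (fun d kv => d.insert kv.1 kv.2) PySem.Dict.empty).items

-- ===== PORT B =====
def length_frequencies_alt (iterable : List String) : List (Int × Int) :=
  let counts := iterable.foldl
    (fun d s => d.insert (PySem.Str.len s) (d.getD (PySem.Str.len s) 0 + 1)) PySem.Dict.empty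
  -- counts[n] in the comprehension: every n comes from counts' keys, so the lookup succeeds (getD exact here)
  ((PySem.List.sorted counts.keys (fun x => x) false).foldl
    (fun d n => d.insert n (counts.getD n 0)) PySem.Dict.empty).items

-- ===== PRECONDITION & SPEC =====
def Spec_length_frequencies (iterable : List String) (out : List (Int × Int)) : Prop := out = length_frequencies_alt iterable
instance (iterable : List String) (out : List (Int × Int)) : Decidable (Spec_length_frequencies iterable out) := by unfold Spec_length_frequencies; infer_instance

-- ===== CLAIM (what is proved, stated in full; the proofs are below) =====
def Claim_equal_length_frequencies : Prop := ∀ (iterable : List String), Dom_length_frequencies iterable → Spec_length_frequencies iterable (length_frequencies iterable)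

-- ===== LEMMAS AND PROOFS =====

-- a key k ≤ every element of a key-sorted list whose head's key differs from k does not occur in it
theorem key_not_mem_aux (f : String → Int) (k : Int) (l : List String)
    (hpair : (l.map f).Pairwise (· ≤ ·))
    (hle : ∀ t ∈ l, k ≤ f t)
    (hhead : ∀ (h : l ≠ []), (f (l.head h) == k) = false) :
    k ∉ l.map f := by
  cases l with
  | nil => simp
  | cons a tl =>
    intro hmem
    have hane : f a ≠ k := by simpa using hhead (by simp)
    simp only [List.map_cons, List.pairwise_cons] at hpair hmem
    rw [List.mem_cons] at hmem
    rcases hmem with hmem | hmem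
    · exact hane hmem.symm
    · exact hane (le_antisymm (hpair.1 k hmem) (hle a (by simp)))

theorem groupRuns_spec (ss : List String) :
    ((ss.map (fun s => PySem.Str.len s)).Pairwise (· ≤ ·)) →
    pvGroupRuns ss
      = ((pvGroupRuns ss).map Prod.fst).map
          (fun k => (k, (((ss.map (fun s => PySem.Str.len s)).count k : Int))))
    ∧ ((pvGroupRuns ss).map Prod.fst).Pairwise (· < ·)
    ∧ (∀ x, x ∈ (pvGroupRuns ss).map Prod.fst ↔ x ∈ ss.map (fun s => PySem.Str.len s)) := by
  induction ss using pvGroupRuns.induct with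
  | case1 => intro _; refine ⟨?_, ?_, ?_⟩ <;> simp [pvGroupRuns]
  | case2 s rest ih =>
    intro h
    simp only [List.map_cons, List.pairwise_cons] at h
    obtain ⟨h1, h2⟩ := h
    have hsplit : List.takeWhile (fun t => PySem.Str.len t == PySem.Str.len s) rest
        ++ List.dropWhile (fun t => PySem.Str.len t == PySem.Str.len s) rest = rest :=
      List.takeWhile_append_dropWhile
    have hsub : (List.dropWhile (fun t => PySem.Str.len t == PySem.Str.len s) rest).Sublist rest :=
      List.dropWhile_sublist _
    have hrunk : ∀ t ∈ List.takeWhile (fun t => PySem.Str.len t == PySem.Str.len s) rest,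
        PySem.Str.len t = PySem.Str.len s := by
      intro t ht
      have hb := List.mem_takeWhile_imp ht
      exact eq_of_beq hb
    have hheadf : ∀ (hne : List.dropWhile (fun t => PySem.Str.len t == PySem.Str.len s) rest ≠ []),
        (PySem.Str.len ((List.dropWhile (fun t => PySem.Str.len t == PySem.Str.len s) rest).head hne)
          == PySem.Str.len s) = false := fun hne => List.head_dropWhile_not _ hne
    rw [pvGroupRuns]
    generalize hRun : List.takeWhile (fun t => PySem.Str.len t == PySem.Str.len s) rest = run at *
    generalize hRest : List.dropWhile (fun t => PySem.Str.len t == PySem.Str.len s) rest = rest' at *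
    have hpair' : (rest'.map (fun s => PySem.Str.len s)).Pairwise (· ≤ ·) := h2.sublist (hsub.map _)
    have hle : ∀ t ∈ rest', PySem.Str.len s ≤ PySem.Str.len t := fun t ht =>
      h1 _ (List.mem_map_of_mem (hsub.subset ht))
    have hnotk : PySem.Str.len s ∉ rest'.map (fun s => PySem.Str.len s) :=
      key_not_mem_aux _ _ _ hpair' hle hheadf
    have hltv : ∀ y ∈ rest'.map (fun s => PySem.Str.len s), PySem.Str.len s < y := by
      intro y hy
      rcases List.mem_map.mp hy with ⟨t, ht, rfl⟩
      exact lt_of_le_of_ne (hle t ht) (fun e => hnotk (by rw [e]; exact hy))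
    obtain ⟨ih1, ih2, ih3⟩ := ih hpair'
    have hmaprest : rest.map (fun s => PySem.Str.len s)
        = run.map (fun s => PySem.Str.len s) ++ rest'.map (fun s => PySem.Str.len s) := by
      rw [← hsplit, List.map_append]
    have hcountk : (PySem.Str.len s :: rest.map (fun s => PySem.Str.len s)).count (PySem.Str.len s)
        = 1 + run.length := by
      have c1 : ∀ b ∈ run.map (fun s => PySem.Str.len s), PySem.Str.len s = b := by
        intro b hb
        rcases List.mem_map.mp hb with ⟨t, ht, rfl⟩
        exact (hrunk t ht).symm
      rw [List.count_cons_self, hmaprest, List.count_append,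
          List.count_eq_length.mpr c1, List.length_map, List.count_eq_zero.mpr hnotk]
      omega
    have hcountne : ∀ x, x ≠ PySem.Str.len s →
        (PySem.Str.len s :: rest.map (fun s => PySem.Str.len s)).count x
          = (rest'.map (fun s => PySem.Str.len s)).count x := by
      intro x hx
      have c1 : x ∉ run.map (fun s => PySem.Str.len s) := by
        intro hmem
        rcases List.mem_map.mp hmem with ⟨t, ht, rfl⟩
        exact hx (hrunk t ht)
      rw [hmaprest, List.count_cons, List.count_append, List.count_eq_zero.mpr c1]
      have hx' : ¬((s.length : Int) = x) := by simpa using Ne.symm hx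
      simp [hx']
    refine ⟨?_, ?_, ?_⟩
    · have htail : pvGroupRuns rest'
          = (List.map Prod.fst (pvGroupRuns rest')).map
              (fun x => (x, ((PySem.Str.len s :: rest.map (fun s => PySem.Str.len s)).count x : Int))) := by
        conv_lhs => rw [ih1]
        refine List.map_congr_left ?_
        intro x hx
        have hxne : x ≠ PySem.Str.len s := by
          intro e
          exact hnotk (e ▸ (ih3 x).mp hx)
        rw [hcountne x hxne]
      simp only [List.map_cons]
      refine List.cons_eq_cons.mpr ⟨?_, htail⟩
      rw [hcountk]
      push_cast
      ring_nf
    · simp only [List.map_cons]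
      exact List.pairwise_cons.mpr ⟨fun y hy => hltv y ((ih3 y).mp hy), ih2⟩
    · intro x
      simp only [List.map_cons, List.mem_cons]
      constructor
      · rintro (rfl | hx)
        · exact Or.inl rfl
        · exact Or.inr ((hsub.map _).subset ((ih3 x).mp hx))
      · rintro (rfl | hx)
        · exact Or.inl rfl
        · rw [← hsplit, List.map_append, List.mem_append] at hx
          rcases hx with hx | hx
          · rcases List.mem_map.mp hx with ⟨t, ht, rfl⟩
            exact Or.inl (hrunk t ht)
          · exact Or.inr ((ih3 x).mpr hx)

theorem length_frequencies_spec' (iterable : List String) :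
    length_frequencies iterable = length_frequencies_alt iterable := by
  classical
  set f : String → Int := fun s => PySem.Str.len s with hf
  set L : List Int := iterable.map f with hL
  set S : List String := PySem.List.sorted iterable f false with hS
  set M : List Int := S.map f with hM
  set R : List (Int × Int) := pvGroupRuns S with hRdef
  have hMpair : M.Pairwise (· ≤ ·) := by
    rw [hM, hS]; exact PySem.List.sorted_map_key_pairwise ..
  have hMperm : M.Perm L := by
    rw [hM, hL, hS]; exact (PySem.List.sorted_perm ..).map f
  obtain ⟨hR1, hR2, hR3⟩ := groupRuns_spec S hMpair
  rw [← hf, ← hM] at hR3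
  -- B's counting dict is Counter(L)
  have hcounts : iterable.foldl
      (fun d s => d.insert (PySem.Str.len s) (d.getD (PySem.Str.len s) 0 + 1)) PySem.Dict.empty
      = PySem.Dict.counter L := by
    rw [hL, ← PySem.Dict.foldl_insert_getD_add_one_eq_counter, List.foldl_map]
  -- the sorted key list of B equals A's run keys
  have hnodupR : (R.map Prod.fst).Nodup := hR2.imp (fun h => ne_of_lt h)
  have hkeq : PySem.List.sorted (PySem.Set.ofList L) (fun x => x) false = R.map Prod.fst := by
    refine PySem.List.sorted_eq_of_perm_of_pairwise_lt _ _ (fun x => x) ?_ hR2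
    refine (List.perm_ext_iff_of_nodup hnodupR (PySem.Set.nodup_ofList L)).mpr ?_
    intro a
    rw [hR3 a, PySem.Set.mem_ofList, hMperm.mem_iff]
  -- unfold both ports to explicit pair lists
  simp only [length_frequencies, length_frequencies_alt]
  rw [hcounts, ← hS, ← hRdef, PySem.Dict.keys_counter, hkeq]
  have hA := PySem.Dict.items_foldl_insert_fresh R Prod.fst Prod.snd PySem.Dict.empty
        (by intro a _; exact PySem.Dict.contains_empty _) hnodupR
  have hB := PySem.Dict.items_foldl_insert_fresh (R.map Prod.fst) (fun n => n)
        (fun n => (PySem.Dict.counter L).getD n 0) PySem.Dict.empty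
        (by intro a _; exact PySem.Dict.contains_empty _) (by simpa using hnodupR)
  rw [hA, hB]
  simp only [PySem.Dict.empty, List.nil_append, Prod.mk.eta, List.map_id']
  calc R = (R.map Prod.fst).map (fun k => (k, (M.count k : Int))) := hR1
    _ = (R.map Prod.fst).map (fun a => (a, (PySem.Dict.counter L).getD a 0)) := by
        refine List.map_congr_left ?_
        intro k _
        rw [PySem.Dict.getD_counter, hMperm.count_eq]

-- ===== VERDICT (by name: the statement is the Claim_ definition above) =====
theorem length_frequencies_spec : Claim_equal_length_frequencies := by
  intro it _
  exact length_frequencies_spec' it
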